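-- pv_equiv track=rewrite | github.com/Daft396/Dictionary-Challenges | Dictionary challenges.py | pop_and_sum
-- ===== SOURCE A (Python) =====
-- def pop_and_sum(data,values):
--      sum = 0
--      for item in data:
--          if item in values:
--              sum += data.get(item)
--
--      for item in values:
--          if item in data:
--              data.pop(item)
--
--      return sum
-- ===== SOURCE B (Python) =====
-- def pop_and_sum(data, values):
--     total = 0
--     for item in values:
--         if item in data:
--             total += data.pop(item)
--     return total
-- ===== Notes on version B (the rewrite author's own statement) =====
-- stated objective: faster
-- what changed: Collapsed A's two passes (a sum pass over the dict with an O(m) list-membership test per key, then a removal pass over values) into one loop over values that pops each matching key and accumulates pop's return value.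
import Mathlib
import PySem

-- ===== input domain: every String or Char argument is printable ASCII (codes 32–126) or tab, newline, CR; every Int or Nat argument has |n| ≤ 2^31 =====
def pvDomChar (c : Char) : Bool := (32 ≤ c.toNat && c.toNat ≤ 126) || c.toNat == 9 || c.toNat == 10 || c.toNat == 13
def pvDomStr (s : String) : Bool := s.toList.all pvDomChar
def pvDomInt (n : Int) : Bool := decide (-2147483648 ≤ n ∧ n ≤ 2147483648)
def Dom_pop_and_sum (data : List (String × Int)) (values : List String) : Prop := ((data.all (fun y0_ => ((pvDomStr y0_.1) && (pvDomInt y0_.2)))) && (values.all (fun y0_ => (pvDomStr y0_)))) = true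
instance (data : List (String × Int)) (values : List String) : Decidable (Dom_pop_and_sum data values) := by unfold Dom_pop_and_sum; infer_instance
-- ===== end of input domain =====

-- B merges A's two passes (sum, then remove) into one loop over `values` using pop's
-- return value; equivalence proved is about the RETURN value (both also mutate the dict
-- identically in Python, removing every key of `values` that is present).

-- ===== PORT A =====
def pop_and_sum (data : List (String × Int)) (values : List String) : Int :=
  let d := PySem.Dict.ofList data
  -- first loop: for item in data: if item in values: sum += data.get(item)
  let s := d.keys.foldl (fun sum item =>
      if values.contains item then sum + d.getD item 0 else sum) 0
  -- second loop: for item in values: if item in data: data.pop(item)  (mutation only)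
  let _d2 := values.foldl (fun d item =>
      if d.contains item then ((d.pop? item).map (·.2)).getD d else d) d
  s

-- ===== PORT B =====
def pop_and_sum_alt (data : List (String × Int)) (values : List String) : Int :=
  -- total = 0; for item in values: if item in data: total += data.pop(item)
  (values.foldl (fun (st : PySem.Dict String Int × Int) item =>
      match st.1.pop? item with
      | some (v, d') => (d', st.2 + v)
      | none => st) (PySem.Dict.ofList data, 0)).2

-- ===== PRECONDITION & SPEC =====
def Spec_pop_and_sum (data : List (String × Int)) (values : List String) (out : Int) : Prop := out = pop_and_sum_alt data values
instance (data : List (String × Int)) (values : List String) (out : Int) : Decidable (Spec_pop_and_sum data values out) := by unfold Spec_pop_and_sum; infer_instance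

-- ===== CLAIM (what is proved, stated in full; the proofs are below) =====
def Claim_equal_pop_and_sum : Prop := ∀ (data : List (String × Int)) (values : List String), Dom_pop_and_sum data values → Spec_pop_and_sum data values (pop_and_sum data values)

-- ===== LEMMAS AND PROOFS =====

/-- Helper for the proofs: the sum of the values of `xs` whose key occurs in `vs`. -/
def sumMatch (xs : List (String × Int)) (vs : List String) : Int :=
  ((xs.filter (fun p => decide (p.1 ∈ vs))).map (·.2)).sum

theorem sumMatch_cons (p : String × Int) (xs : List (String × Int)) (vs : List String) :
    sumMatch (p :: xs) vs = (if p.1 ∈ vs then p.2 else 0) + sumMatch xs vs := by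
  unfold sumMatch
  rw [List.filter_cons]
  split
  · rename_i h
    simp only [decide_eq_true_eq] at h
    simp [h]
  · rename_i h
    simp only [decide_eq_true_eq] at h
    simp [h]

theorem sumMatch_not_mem (xs : List (String × Int)) (v : String) (vs : List String)
    (h : v ∉ xs.map Prod.fst) : sumMatch xs (v :: vs) = sumMatch xs vs := by
  induction xs with
  | nil => rfl
  | cons p xs ih =>
    have h' : v ∉ xs.map Prod.fst := fun m => h (by simp [List.mem_map] at m ⊢; tauto)
    have hp : p.1 ≠ v := fun e => h (by simp [← e])
    rw [sumMatch_cons, sumMatch_cons, ih h']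
    have : (p.1 = v ∨ p.1 ∈ vs) ↔ p.1 ∈ vs := by
      constructor
      · rintro (e | m)
        exacts [absurd e hp, m]
      · exact Or.inr
    simp [List.mem_cons, this]

theorem filter_ne_eq_self (xs : List (String × Int)) (v : String)
    (h : v ∉ xs.map Prod.fst) : xs.filter (fun p => !(p.1 == v)) = xs := by
  apply List.filter_eq_self.mpr
  intro p hp
  have : p.1 ≠ v := fun e => h (e ▸ List.mem_map_of_mem hp)
  simp [this]

theorem sumMatch_find (v : String) (vs : List String) :
    ∀ (xs : List (String × Int)) (q : String × Int),
    (xs.map Prod.fst).Nodup →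
    xs.find? (fun p => p.1 == v) = some q →
    sumMatch xs (v :: vs) = q.2 + sumMatch (xs.filter (fun p => !(p.1 == v))) vs := by
  intro xs
  induction xs with
  | nil => intro q _ h; simp at h
  | cons p xs ih =>
    intro q hnd hf
    have hnd' : (xs.map Prod.fst).Nodup := (List.nodup_cons.mp hnd).2
    by_cases hp : p.1 = v
    · rw [List.find?_cons_of_pos (by simp [hp])] at hf
      obtain rfl : p = q := Option.some.inj hf
      have hv : v ∉ xs.map Prod.fst := hp ▸ (List.nodup_cons.mp hnd).1
      rw [List.filter_cons]
      rw [if_neg (by simp [hp])]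
      rw [sumMatch_cons, filter_ne_eq_self xs v hv, sumMatch_not_mem xs v vs hv]
      rw [if_pos (by simp [hp])]
    · rw [List.find?_cons_of_neg (by simp [hp])] at hf
      have ihx := ih q hnd' hf
      rw [List.filter_cons]
      rw [if_pos (by simp [hp])]
      rw [sumMatch_cons, sumMatch_cons, ihx]
      have hmem : (p.1 ∈ v :: vs) ↔ (p.1 ∈ vs) := by
        constructor
        · intro m
          rcases List.mem_cons.mp m with e | m'
          exacts [absurd e hp, m']
        · exact List.mem_cons_of_mem v
      by_cases hm : p.1 ∈ vs
      · rw [if_pos (hmem.mpr hm), if_pos hm]; ring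
      · rw [if_neg (fun m => hm (hmem.mp m)), if_neg hm]; ring

theorem keys_erase (d : PySem.Dict String Int) (v : String) :
    (d.erase v).keys = d.keys.filter (fun x => !(x == v)) := by
  show (d.items.filter (fun p => !(p.1 == v))).map Prod.fst
      = (d.items.map Prod.fst).filter (fun x => !(x == v))
  rw [List.filter_map]
  rfl

-- the B-side loop invariant: the fold over `values` accumulates exactly `sumMatch`
theorem foldB (vs : List String) :
    ∀ (d : PySem.Dict String Int) (t : Int), d.keys.Nodup →
    (vs.foldl (fun (st : PySem.Dict String Int × Int) item =>
        match st.1.pop? item with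
        | some (v, d') => (d', st.2 + v)
        | none => st) (d, t)).2 = t + sumMatch d.items vs := by
  induction vs with
  | nil => intro d t _; simp [sumMatch]
  | cons v vs ih =>
    intro d t hnd
    rw [List.foldl_cons]
    cases hpop : d.pop? v with
    | none =>
      have hfind : d.items.find? (fun p => p.1 == v) = none := by
        simpa only [PySem.Dict.pop?, PySem.Dict.get?, Option.map_eq_none_iff] using hpop
      have hv : v ∉ d.items.map Prod.fst := by
        intro hmem
        rcases List.mem_map.mp hmem with ⟨p, hp, he⟩
        have := List.find?_eq_none.mp hfind p hp
        simp [he] at this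
      rw [ih d t hnd, sumMatch_not_mem d.items v vs hv]
    | some r =>
      obtain ⟨val, d2⟩ := r
      have hpop' := hpop
      simp only [PySem.Dict.pop?] at hpop'
      cases hg : d.get? v with
      | none =>
        rw [hg] at hpop'; simp at hpop'
      | some w =>
        rw [hg] at hpop'
        simp only [Option.map_some, Option.some.injEq, Prod.mk.injEq] at hpop'
        obtain ⟨hw, hd2⟩ := hpop'
        have hfind : ∃ q, d.items.find? (fun p => p.1 == v) = some q ∧ q.2 = val := by
          simp only [PySem.Dict.get?] at hg
          cases hf : d.items.find? (fun p => p.1 == v) with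
          | none => rw [hf] at hg; simp at hg
          | some q =>
            rw [hf] at hg
            simp only [Option.map_some, Option.some.injEq] at hg
            exact ⟨q, rfl, by rw [hg, hw]⟩
        obtain ⟨q, hf, hq2⟩ := hfind
        have hnd' : (d.erase v).keys.Nodup := by
          rw [keys_erase]; exact hnd.filter _
        rw [← hd2, ih (d.erase v) (t + val) hnd']
        have hitems : (d.erase v).items = d.items.filter (fun p => !(p.1 == v)) := rfl
        rw [hitems, sumMatch_find v vs d.items q hnd hf, hq2]
        ring

-- the A-side loop equals `sumMatch`
theorem foldl_sum (xs : List (String × Int)) (vs : List String) :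
    ∀ (t : Int),
    xs.foldl (fun s p => if vs.contains p.1 then s + p.2 else s) t = t + sumMatch xs vs := by
  induction xs with
  | nil => intro t; simp [sumMatch]
  | cons p xs ih =>
    intro t
    rw [List.foldl_cons, sumMatch_cons]
    by_cases hm : p.1 ∈ vs
    · rw [if_pos (by simpa using hm), if_pos hm, ih]
      ring
    · rw [if_neg (by simpa using hm), if_neg hm, ih]
      ring

theorem foldl_congr_all {a b : Type} (xs : List b) (f g : a -> b -> a) :
    ∀ (t : a), (∀ s p, p ∈ xs → f s p = g s p) → xs.foldl f t = xs.foldl g t := by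
  induction xs with
  | nil => intro t _; rfl
  | cons p xs ih =>
    intro t h
    rw [List.foldl_cons, List.foldl_cons, h t p List.mem_cons_self]
    exact ih _ (fun s q hq => h s q (List.mem_cons_of_mem _ hq))

theorem foldA (d : PySem.Dict String Int) (hnd : d.keys.Nodup) (vs : List String) :
    d.keys.foldl (fun s item => if vs.contains item then s + d.getD item 0 else s) 0
      = sumMatch d.items vs := by
  show (d.items.map Prod.fst).foldl _ 0 = _
  rw [List.foldl_map]
  rw [foldl_congr_all d.items
      (fun s p => if vs.contains p.1 then s + d.getD p.1 0 else s)
      (fun s p => if vs.contains p.1 then s + p.2 else s) 0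
      (fun s p hp => by
        obtain ⟨k, x⟩ := p
        dsimp only
        rw [PySem.Dict.getD_of_mem_items d hp hnd])]
  rw [foldl_sum d.items vs 0]
  ring

-- ===== VERDICT (by name: the statement is the Claim_ definition above) =====
theorem pop_and_sum_spec : Claim_equal_pop_and_sum := by
  intro data values _
  unfold Spec_pop_and_sum pop_and_sum pop_and_sum_alt
  dsimp only
  have hnd : (PySem.Dict.ofList data).keys.Nodup := PySem.Dict.nodup_keys_ofList data
  rw [foldB values (PySem.Dict.ofList data) 0 hnd]
  rw [foldA (PySem.Dict.ofList data) hnd values]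
  ring
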